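-- pv_equiv track=rewrite | github.com/ErshovVladislav10M/3_Course | Code_from_Webots/Sensor_measurements/Error_DistanceSensor.py | create_X_Y
-- ===== SOURCE A (Python) =====
-- def create_X_Y(Y2):
--     X1 = []
--     for i in Y2:
--         if i not in X1:
--            X1.append(i)
--
--     X1.sort()
--     Y1 = [0 for i in range(len(X1))]
--     for i in Y2:
--         if i in X1:
--            Y1[X1.index(i)] += 1
--
--     return X1, Y1
-- ===== SOURCE B (Python) =====
-- def create_X_Y(Y2):
--     cnt = {}
--     for v in Y2:
--         cnt[v] = cnt.get(v, 0) + 1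
--     X1 = sorted(cnt)
--     Y1 = [cnt[v] for v in X1]
--     return X1, Y1
-- ===== Notes on version B (the rewrite author's own statement) =====
-- stated objective: faster
-- what changed: Replaces A's quadratic dedup-by-membership-scan and per-element list.index increment loop with a single-pass dict counter whose sorted keys and looked-up counts are the answer.
import Mathlib
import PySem

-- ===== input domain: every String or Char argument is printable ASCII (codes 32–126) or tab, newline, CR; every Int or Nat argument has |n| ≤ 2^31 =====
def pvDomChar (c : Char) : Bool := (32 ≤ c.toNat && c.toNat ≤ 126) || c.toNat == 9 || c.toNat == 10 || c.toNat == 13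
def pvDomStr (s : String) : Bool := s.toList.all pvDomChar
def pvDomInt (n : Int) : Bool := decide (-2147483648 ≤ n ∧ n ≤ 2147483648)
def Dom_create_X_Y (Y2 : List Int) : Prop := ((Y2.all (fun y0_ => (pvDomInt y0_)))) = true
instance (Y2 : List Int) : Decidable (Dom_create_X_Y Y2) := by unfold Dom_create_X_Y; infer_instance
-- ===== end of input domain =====

-- B replaces A's quadratic membership-scan dedup and list.index increment loop with a
-- single-pass dict counter (sorted keys + count lookups); same return value, B does not
-- mutate its argument (A never mutates Y2 either, only its local X1).

-- ===== PORT A =====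
def create_X_Y (Y2 : List Int) : List Int × List Int :=
  -- X1 = []; for i in Y2: if i not in X1: X1.append(i)
  let X1 := Y2.foldl (fun acc i => if i ∈ acc then acc else acc ++ [i]) []
  -- X1.sort()
  let X1s := PySem.List.sorted X1 (fun x => x)
  -- Y1 = [0 for i in range(len(X1))]
  let Y1 := (List.range X1s.length).map (fun _ => (0 : Int))
  -- for i in Y2: if i in X1: Y1[X1.index(i)] += 1
  -- (the guard makes index() succeed, so the index is always in range and the
  --  none branch of index? is unreachable)
  let Y1f := Y2.foldl (fun acc i =>
    if i ∈ X1s then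
      match PySem.List.index? X1s i with
      | some k => acc.set k (acc.getD k 0 + 1)
      | none => acc
    else acc) Y1
  (X1s, Y1f)

-- ===== PORT B =====
def create_X_Y_alt (Y2 : List Int) : List Int × List Int :=
  -- cnt = {}; for v in Y2: cnt[v] = cnt.get(v, 0) + 1
  let cnt := Y2.foldl (fun d v => d.insert v (d.getD v 0 + 1)) PySem.Dict.empty
  -- X1 = sorted(cnt)
  let X1 := PySem.List.sorted cnt.keys (fun x => x)
  -- Y1 = [cnt[v] for v in X1]  (v is always a key of cnt, so cnt[v] never raises: total form getD)
  let Y1 := X1.map (fun v => cnt.getD v 0)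
  (X1, Y1)

-- ===== PRECONDITION & SPEC =====
def Spec_create_X_Y (Y2 : List Int) (out : List Int × List Int) : Prop := out = create_X_Y_alt Y2
instance (Y2 : List Int) (out : List Int × List Int) : Decidable (Spec_create_X_Y Y2 out) := by unfold Spec_create_X_Y; infer_instance

-- ===== CLAIM (what is proved, stated in full; the proofs are below) =====
def Claim_equal_create_X_Y : Prop := ∀ (Y2 : List Int), Dom_create_X_Y Y2 → Spec_create_X_Y Y2 (create_X_Y Y2)

-- ===== LEMMAS AND PROOFS =====

-- A's first loop is exactly set(...)-style ordered dedup (PySem.Set.add fold).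
theorem foldA_eq_ofList (ys : List Int) :
    ys.foldl (fun acc i => if i ∈ acc then acc else acc ++ [i]) [] = PySem.Set.ofList ys := by
  rw [PySem.Set.ofList_eq_foldl]
  have h : ∀ (l acc : List Int),
      l.foldl (fun acc i => if i ∈ acc then acc else acc ++ [i]) acc = l.foldl PySem.Set.add acc := by
    intro l
    induction l with
    | nil => intro acc; rfl
    | cons x t ih =>
      intro acc
      simp only [List.foldl_cons, PySem.Set.add, PySem.Set.contains]
      by_cases h : x ∈ acc
      · simp [h, ih]
      · simp [h, ih]
  exact h ys []

theorem zeros_getD (n k : Nat) : ((List.range n).map (fun _ => (0 : Int))).getD k 0 = 0 := by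
  rcases lt_or_ge k n with h | h
  · rw [List.getD_eq_getElem _ _ (by simpa using h)]
    simp
  · rw [List.getD_eq_default _ _ (by simpa using h)]

theorem map_range_getD (L : List Int) (f : Int → Int) :
    (List.range L.length).map (fun k => f (L.getD k 0)) = L.map f := by
  apply List.ext_getElem
  · simp
  · intro k h1 h2
    simp only [List.getElem_map, List.getElem_range]
    rw [List.getD_eq_getElem _ _ (by simpa using h2)]

-- A's second loop, generalized: starting from any accumulator of the right length,
-- it adds to slot k the number of occurrences of L[k] in the remaining input.
theorem countFold (L : List Int) (hnd : L.Nodup) :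
    ∀ (ys acc : List Int), acc.length = L.length → (∀ i ∈ ys, i ∈ L) →
      ys.foldl (fun acc i =>
        if i ∈ L then
          match PySem.List.index? L i with
          | some k => acc.set k (acc.getD k 0 + 1)
          | none => acc
        else acc) acc
      = (List.range L.length).map (fun k => acc.getD k 0 + (ys.count (L.getD k 0) : Int)) := by
  intro ys
  induction ys with
  | nil =>
    intro acc hlen _
    simp only [List.foldl_nil, List.count_nil]
    apply List.ext_getElem
    · simp [hlen]
    · intro k h1 h2
      simp only [List.getElem_map, List.getElem_range]
      rw [List.getD_eq_getElem _ _ (by omega)]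
      simp
  | cons i rest ih =>
    intro acc hlen hmem
    have hiL : i ∈ L := hmem i (by simp)
    obtain ⟨k, hk⟩ : ∃ k, PySem.List.index? L i = some k := by
      have : (List.idxOf? i L).isSome := List.isSome_idxOf?.mpr hiL
      exact Option.isSome_iff_exists.mp this
    obtain ⟨hklt, hLk, _⟩ := PySem.List.getElem_of_index?_eq_some hk
    simp only [List.foldl_cons, if_pos hiL, hk]
    rw [ih (acc.set k (acc.getD k 0 + 1)) (by simp [hlen]) (fun j hj => hmem j (by simp [hj]))]
    apply List.map_congr_left
    intro j hj
    have hjlt : j < L.length := List.mem_range.mp hj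
    have hja : j < acc.length := by omega
    rw [List.getD_eq_getElem _ _ (by simp [hja]),
        List.getD_eq_getElem _ _ hja, List.getElem_set]
    have hLj : L.getD j 0 = L[j] := List.getD_eq_getElem _ _ hjlt
    by_cases hjk : k = j
    · subst hjk
      rw [if_pos rfl]
      have hacc : acc.getD k 0 = acc[k]'hja := List.getD_eq_getElem _ _ hja
      have : (i :: rest).count L[k] = rest.count L[k] + 1 := by
        rw [hLk]; simp
      rw [hLj] at *
      rw [hacc]
      omega
    · rw [if_neg hjk]
      have hne : L[j] ≠ i := by
        rw [← hLk]
        intro hcontra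
        exact hjk ((hnd.getElem_inj_iff).mp hcontra.symm)
      have : (i :: rest).count (L.getD j 0) = rest.count (L.getD j 0) := by
        rw [hLj]; simp [Ne.symm hne]
      omega

theorem a_eq_canonical (Y2 : List Int) :
    create_X_Y Y2 = (PySem.List.sorted (PySem.Set.ofList Y2) (fun x => x),
      (PySem.List.sorted (PySem.Set.ofList Y2) (fun x => x)).map (fun v => (Y2.count v : Int))) := by
  unfold create_X_Y
  dsimp only
  rw [foldA_eq_ofList]
  set L := PySem.List.sorted (PySem.Set.ofList Y2) (fun x => x) with hL
  have hnd : L.Nodup :=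
    ((PySem.List.sorted_perm (PySem.Set.ofList Y2) (fun x => x) false).nodup_iff).mpr
      (PySem.Set.nodup_ofList Y2)
  have hmem : ∀ i ∈ Y2, i ∈ L := by
    intro i hi
    rw [hL, PySem.List.mem_sorted, PySem.Set.mem_ofList]
    exact hi
  refine Prod.ext rfl ?_
  simp only
  rw [countFold L hnd Y2 _ (by simp) hmem]
  have : (List.range L.length).map
      (fun k => (((List.range L.length).map (fun _ => (0:Int))).getD k 0) + (Y2.count (L.getD k 0) : Int))
      = (List.range L.length).map (fun k => ((Y2.count (L.getD k 0) : Int))) := by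
    apply List.map_congr_left
    intro j _
    rw [zeros_getD]
    ring
  rw [this, map_range_getD L (fun v => (Y2.count v : Int))]

theorem b_eq_canonical (Y2 : List Int) :
    create_X_Y_alt Y2 = (PySem.List.sorted (PySem.Set.ofList Y2) (fun x => x),
      (PySem.List.sorted (PySem.Set.ofList Y2) (fun x => x)).map (fun v => (Y2.count v : Int))) := by
  unfold create_X_Y_alt
  dsimp only
  rw [PySem.Dict.keys_foldl_insert]
  have hupd : PySem.Set.update (PySem.Dict.empty (κ := Int) (ν := Int)).keys Y2
      = PySem.Set.ofList Y2 := by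
    rw [PySem.Set.ofList_eq_foldl]; rfl
  rw [hupd]
  refine Prod.ext rfl ?_
  simp only
  apply List.map_congr_left
  intro v _
  rw [PySem.Dict.getD_foldl_insert_add_one, PySem.Dict.getD_empty]
  ring

-- ===== VERDICT (by name: the statement is the Claim_ definition above) =====
theorem create_X_Y_spec : Claim_equal_create_X_Y := by
  intro Y2 _
  unfold Spec_create_X_Y
  rw [a_eq_canonical, b_eq_canonical]
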